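-- pv_equiv track=rewrite | github.com/bobo9245/Baekjoon | 백준/Silver/1105. 팔/팔.py | count_min_eights
-- ===== SOURCE A (Python) =====
-- def count_min_eights(L: int, R: int) -> int:
--     # 문자열로 변환
--     sL = str(L)
--     sR = str(R)
--
--     # 자릿수가 다르면 최소 8의 개수는 0
--     if len(sL) != len(sR):
--         return 0
--
--     # 공통 접두사에서 8의 개수를 센다
--     common_eight_count = 0
--     for i in range(len(sL)):
--         if sL[i] == sR[i]:
--             if sL[i] == '8':
--                 common_eight_count += 1
--         else:
--             break  # 접두사가 다르면 종료
--
--     return common_eight_count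
-- ===== SOURCE B (Python) =====
-- def count_min_eights(L: int, R: int) -> int:
--     # pure integer arithmetic: no string conversion at all
--     if (L < 0) != (R < 0):
--         return 0
--     a, b = abs(L), abs(R)
--     if _num_digits(a) != _num_digits(b):
--         return 0
--     # strip least-significant digits until the two numbers agree;
--     # what remains is the numeric value of the common decimal prefix
--     while a != b:
--         a //= 10
--         b //= 10
--     # count digits equal to 8 in that common value
--     count = 0
--     while a > 0:
--         if a % 10 == 8:
--             count += 1
--         a //= 10
--     return count
--
-- def _num_digits(n: int) -> int:
--     d = 1
--     while n >= 10:
--         n //= 10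
--         d += 1
--     return d
-- ===== Notes on version B (the rewrite author's own statement) =====
-- stated objective: alternative
-- what changed: Replaces A's string conversion and left-to-right character scan with pure integer arithmetic: an explicit sign guard, digit counts computed by repeated division, stripping least-significant digits until the two numbers coincide, then counting 8-digits of the remaining common value with mod/div.
import Mathlib
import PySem

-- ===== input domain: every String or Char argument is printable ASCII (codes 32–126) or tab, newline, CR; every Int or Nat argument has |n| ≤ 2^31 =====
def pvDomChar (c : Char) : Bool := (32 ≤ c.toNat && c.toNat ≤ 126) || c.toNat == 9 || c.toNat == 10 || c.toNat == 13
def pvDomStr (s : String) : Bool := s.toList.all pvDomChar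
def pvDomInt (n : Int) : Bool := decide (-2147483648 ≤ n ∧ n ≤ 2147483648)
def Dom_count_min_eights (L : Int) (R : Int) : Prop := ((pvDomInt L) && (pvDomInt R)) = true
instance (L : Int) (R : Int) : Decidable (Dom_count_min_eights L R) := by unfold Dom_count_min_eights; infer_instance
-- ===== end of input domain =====

-- B replaces A's string conversion and character scan by pure integer arithmetic (sign guard, digit counts by repeated division, stripping trailing digits until the numbers agree, counting 8-digits with mod/div); alternative algorithm, same cost.


-- ===== PORT A =====
-- A's for-loop over i in range(len(sL)) comparing sL[i], sR[i] with an early break,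
-- transcribed as structural recursion over the two char lists in lockstep (it is only
-- entered when the lengths are equal).
def pvALoop : List Char → List Char → Int → Int
  | a :: as, b :: bs, acc =>
      if a = b then pvALoop as bs (if a = '8' then acc + 1 else acc) else acc
  | _, _, acc => acc

def count_min_eights (L : Int) (R : Int) : Int :=
  let sL := PySem.Int.toChars L
  let sR := PySem.Int.toChars R
  if sL.length ≠ sR.length then 0
  else pvALoop sL sR 0

-- ===== PORT B =====
-- _num_digits: d = 1; while n >= 10: n //= 10; d += 1.  Source B works on abs(L), abs(R),
-- which are nonnegative, so the loops are ported over Nat (Python // on these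
-- nonnegative values is exactly Nat division).
def pvNumDigitsGo (n d : Nat) : Nat :=
  if 10 ≤ n then pvNumDigitsGo (n / 10) (d + 1) else d
termination_by n
decreasing_by omega

-- while a != b: a //= 10; b //= 10  (returns the final common value of a)
def pvStripGo (a b : Nat) : Nat :=
  if a ≠ b then pvStripGo (a / 10) (b / 10) else a
termination_by a + b
decreasing_by omega

-- count = 0; while a > 0: if a % 10 == 8: count += 1; a //= 10
def pvCnt8Go (a c : Nat) : Nat :=
  if 0 < a then pvCnt8Go (a / 10) (if a % 10 = 8 then c + 1 else c) else c
termination_by a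
decreasing_by omega

def count_min_eights_alt (L : Int) (R : Int) : Int :=
  if (decide (L < 0)) ≠ (decide (R < 0)) then 0
  else
    let a := L.natAbs
    let b := R.natAbs
    if pvNumDigitsGo a 1 ≠ pvNumDigitsGo b 1 then 0
    else ((pvCnt8Go (pvStripGo a b) 0 : Nat) : Int)

-- ===== PRECONDITION & SPEC =====
def Spec_count_min_eights (L : Int) (R : Int) (out : Int) : Prop := out = count_min_eights_alt L R
instance (L : Int) (R : Int) (out : Int) : Decidable (Spec_count_min_eights L R out) := by unfold Spec_count_min_eights; infer_instance

-- ===== CLAIM (what is proved, stated in full; the proofs are below) =====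
def Claim_equal_count_min_eights : Prop := ∀ (L : Int) (R : Int), Dom_count_min_eights L R → Spec_count_min_eights L R (count_min_eights L R)

-- ===== LEMMAS AND PROOFS =====

-- proof-side reference: the decimal digit characters of n, most significant first
def pvDigRev (n : Nat) : List Char :=
  if h : n < 10 then [Nat.digitChar n] else pvDigRev (n / 10) ++ [Nat.digitChar (n % 10)]
termination_by n
decreasing_by omega

theorem pv_digRev_small {n : Nat} (h : n < 10) : pvDigRev n = [Nat.digitChar n] := by
  rw [pvDigRev]; simp [h]

theorem pv_digRev_big {n : Nat} (h : ¬ n < 10) :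
    pvDigRev n = pvDigRev (n / 10) ++ [Nat.digitChar (n % 10)] := by
  rw [pvDigRev]; simp [h]

theorem pv_numDigitsGo_ge {n d : Nat} (h : 10 ≤ n) :
    pvNumDigitsGo n d = pvNumDigitsGo (n / 10) (d + 1) := by
  rw [pvNumDigitsGo]; simp [h]

theorem pv_numDigitsGo_lt {n d : Nat} (h : ¬ 10 ≤ n) : pvNumDigitsGo n d = d := by
  rw [pvNumDigitsGo]; simp [h]

theorem pv_stripGo_ne {a b : Nat} (h : a ≠ b) : pvStripGo a b = pvStripGo (a / 10) (b / 10) := by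
  rw [pvStripGo]; simp [h]

theorem pv_stripGo_eq (a : Nat) : pvStripGo a a = a := by
  rw [pvStripGo]; simp

theorem pv_cnt8Go_pos {a : Nat} (c : Nat) (h : 0 < a) :
    pvCnt8Go a c = pvCnt8Go (a / 10) (if a % 10 = 8 then c + 1 else c) := by
  rw [pvCnt8Go]; simp [h]

theorem pv_cnt8Go_zero (c : Nat) : pvCnt8Go 0 c = c := by
  rw [pvCnt8Go]; simp

theorem pv_toDigitsCore_eq (f : Nat) : ∀ (n : Nat) (acc : List Char), n < 10 ^ f → 0 < f →
    Nat.toDigitsCore 10 f n acc = pvDigRev n ++ acc := by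
  induction f with
  | zero => omega
  | succ f ih =>
    intro n acc hlt _
    rw [Nat.toDigitsCore]
    by_cases h : n / 10 = 0
    · have hn : n < 10 := by omega
      rw [pv_digRev_small hn]
      simp [h, Nat.mod_eq_of_lt hn]
    · have hn : ¬ n < 10 := by omega
      have hf : 0 < f := by
        by_contra hf
        have : f = 0 := by omega
        subst this
        simp at hlt
        omega
      have hdiv : n / 10 < 10 ^ f := by
        rw [Nat.div_lt_iff_lt_mul (by norm_num)]
        calc n < 10 ^ (f + 1) := hlt
        _ = 10 ^ f * 10 := by ring
      rw [if_neg h, ih (n / 10) _ hdiv hf, pv_digRev_big hn, List.append_assoc]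
      simp

theorem pv_toDigits_eq (n : Nat) : Nat.toDigits 10 n = pvDigRev n := by
  have h : n < 10 ^ (n + 1) := by
    calc n < n + 1 := by omega
    _ ≤ 10 ^ (n + 1) := Nat.le_of_lt (Nat.lt_pow_self (by norm_num))
  simpa using pv_toDigitsCore_eq (n + 1) n [] h (by omega)

-- proof-side common prefix
def pvCP : List Char → List Char → List Char
  | x :: xs, y :: ys => if x = y then x :: pvCP xs ys else []
  | _, _ => []

theorem pv_aloop_cp (as bs : List Char) (acc : Int) :
    pvALoop as bs acc = acc + (((pvCP as bs).count '8' : Nat) : Int) := by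
  induction as generalizing bs acc with
  | nil => simp [pvALoop, pvCP]
  | cons a as ih =>
    cases bs with
    | nil => simp [pvALoop, pvCP]
    | cons b bs =>
      rw [pvALoop, pvCP]
      by_cases h : a = b
      · rw [if_pos h, if_pos h, ih, List.count_cons]
        by_cases h8 : a = '8'
        · simp [h8]; ring
        · have : ¬ ('8' = a) := fun he => h8 he.symm
          simp [h8, this]
      · simp [h]

theorem pv_cp_self (xs : List Char) : pvCP xs xs = xs := by
  induction xs with
  | nil => rfl
  | cons x xs ih => simp [pvCP, ih]

theorem pv_cp_append (xs ys : List Char) (x y : Char) (h : xs.length = ys.length) :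
    pvCP (xs ++ [x]) (ys ++ [y]) =
      if xs = ys then xs ++ (if x = y then [x] else []) else pvCP xs ys := by
  induction xs generalizing ys with
  | nil =>
    cases ys with
    | nil => simp [pvCP]
    | cons b bs => simp at h
  | cons a as ih =>
    cases ys with
    | nil => simp at h
    | cons b bs =>
      have h' : as.length = bs.length := by simpa using h
      by_cases hab : a = b
      · subst hab
        simp only [List.cons_append, pvCP, if_pos rfl, ih bs h']
        by_cases he : as = bs
        · simp [he]
        · have : ¬ (a :: as = a :: bs) := by simp [he]
          simp [he, this, pvCP]
      · have : ¬ (a :: as = b :: bs) := by simp [hab]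
        simp [pvCP, hab, this]

theorem pv_digitChar_eight_fin : ∀ n : Fin 10, ((Nat.digitChar n.val = '8') ↔ n.val = 8) := by decide

theorem pv_digitChar_inj_fin : ∀ a b : Fin 10, Nat.digitChar a.val = Nat.digitChar b.val → a = b := by decide

theorem pv_digitChar_ne_dash_fin : ∀ m : Fin 10, Nat.digitChar m.val ≠ '-' := by decide

theorem pv_digitChar_eight {n : Nat} (h : n < 10) : (Nat.digitChar n = '8') ↔ n = 8 :=
  pv_digitChar_eight_fin ⟨n, h⟩

theorem pv_digitChar_inj {a b : Nat} (ha : a < 10) (hb : b < 10)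
    (h : Nat.digitChar a = Nat.digitChar b) : a = b :=
  congrArg Fin.val (pv_digitChar_inj_fin ⟨a, ha⟩ ⟨b, hb⟩ h)

theorem pv_digRev_ne_nil (n : Nat) : pvDigRev n ≠ [] := by
  by_cases h : n < 10
  · rw [pv_digRev_small h]; simp
  · rw [pv_digRev_big h]; simp

theorem pv_digRev_head_digit (n : Nat) :
    ∀ c cs, pvDigRev n = c :: cs → ∃ m, m < 10 ∧ c = Nat.digitChar m := by
  induction n using Nat.strong_induction_on with
  | _ n ih =>
    intro c cs hcs
    by_cases h : n < 10
    · rw [pv_digRev_small h] at hcs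
      simp at hcs
      exact ⟨n, h, hcs.1.symm⟩
    · rw [pv_digRev_big h] at hcs
      rcases he : pvDigRev (n / 10) with _ | ⟨c', cs'⟩
      · exact absurd he (pv_digRev_ne_nil _)
      · rw [he] at hcs
        simp at hcs
        obtain ⟨m, hm, hc⟩ := ih (n / 10) (by omega) c' cs' he
        exact ⟨m, hm, hcs.1 ▸ hc⟩

theorem pv_numDigitsGo_acc (n : Nat) : ∀ d : Nat, pvNumDigitsGo n (d + 1) = pvNumDigitsGo n d + 1 := by
  induction n using Nat.strong_induction_on with
  | _ n ih =>
    intro d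
    by_cases h : 10 ≤ n
    · rw [pv_numDigitsGo_ge h, pv_numDigitsGo_ge (d := d) h, ih (n / 10) (by omega)]
    · rw [pv_numDigitsGo_lt h, pv_numDigitsGo_lt h]

theorem pv_digRev_length (n : Nat) : (pvDigRev n).length = pvNumDigitsGo n 1 := by
  induction n using Nat.strong_induction_on with
  | _ n ih =>
    by_cases h : n < 10
    · rw [pv_digRev_small h, pv_numDigitsGo_lt (by omega)]
      rfl
    · rw [pv_digRev_big h, pv_numDigitsGo_ge (by omega), pv_numDigitsGo_acc (n / 10) 1]
      simp [ih (n / 10) (by omega)]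

theorem pv_cnt8Go_acc (n : Nat) : ∀ c : Nat, pvCnt8Go n c = c + pvCnt8Go n 0 := by
  induction n using Nat.strong_induction_on with
  | _ n ih =>
    intro c
    by_cases h : 0 < n
    · rw [pv_cnt8Go_pos c h, pv_cnt8Go_pos 0 h, ih (n / 10) (by omega) (if n % 10 = 8 then c + 1 else c),
        ih (n / 10) (by omega) (if n % 10 = 8 then 0 + 1 else 0)]
      split_ifs <;> omega
    · have hn0 : n = 0 := by omega
      subst hn0
      rw [pv_cnt8Go_zero, pv_cnt8Go_zero]
      omega

theorem pv_count8_digRev (n : Nat) : (pvDigRev n).count '8' = pvCnt8Go n 0 := by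
  induction n using Nat.strong_induction_on with
  | _ n ih =>
    by_cases h : n < 10
    · rw [pv_digRev_small h]
      by_cases h0 : 0 < n
      · rw [pv_cnt8Go_pos 0 h0, Nat.div_eq_of_lt h, pv_cnt8Go_zero, Nat.mod_eq_of_lt h]
        by_cases h8 : n = 8
        · subst h8; simp [List.count_cons, Nat.digitChar]
        · have hne : Nat.digitChar n ≠ '8' := fun he => h8 ((pv_digitChar_eight h).mp he)
          have hne' : ¬ ('8' = Nat.digitChar n) := fun he => hne he.symm
          simp [List.count_cons, hne, hne', h8]
      · have hn0 : n = 0 := by omega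
        subst hn0
        rw [pv_cnt8Go_zero]
        simp [Nat.digitChar]
    · rw [pv_digRev_big h, List.count_append, ih (n / 10) (by omega)]
      conv_rhs => rw [pv_cnt8Go_pos (a := n) 0 (by omega)]
      rw [pv_cnt8Go_acc (n / 10) (if n % 10 = 8 then 0 + 1 else 0)]
      have hm : n % 10 < 10 := by omega
      by_cases h8 : n % 10 = 8
      · have hd : Nat.digitChar (n % 10) = '8' := (pv_digitChar_eight hm).mpr h8
        have hc1 : List.count '8' [Nat.digitChar (n % 10)] = 1 := by
          simp [List.count_cons, hd]
        rw [hc1]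
        simp [h8]
        omega
      · have hne : Nat.digitChar (n % 10) ≠ '8' := fun he => h8 ((pv_digitChar_eight hm).mp he)
        have hc0 : List.count '8' [Nat.digitChar (n % 10)] = 0 := by
          simp [List.count_cons, hne]
        rw [hc0]
        simp [h8]

theorem pv_digRev_len_one {n : Nat} (h : n < 10) : (pvDigRev n).length = 1 := by
  rw [pv_digRev_small h]; rfl

theorem pv_digRev_len_big {n : Nat} (h : ¬ n < 10) :
    (pvDigRev n).length = (pvDigRev (n / 10)).length + 1 := by
  rw [pv_digRev_big h]; simp

theorem pv_digRev_inj (a : Nat) : ∀ b : Nat, pvDigRev a = pvDigRev b → a = b := by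
  induction a using Nat.strong_induction_on with
  | _ a ih =>
    intro b heq
    by_cases ha : a < 10 <;> by_cases hb : b < 10
    · rw [pv_digRev_small ha, pv_digRev_small hb] at heq
      exact pv_digitChar_inj ha hb (by simpa using heq)
    · have h1 := pv_digRev_len_one ha
      have h2 := pv_digRev_len_big hb
      have h3 : (pvDigRev (b / 10)).length ≠ 0 := by
        simpa using pv_digRev_ne_nil (b / 10)
      rw [heq, h2] at h1; omega
    · have h1 := pv_digRev_len_one hb
      have h2 := pv_digRev_len_big ha
      have h3 : (pvDigRev (a / 10)).length ≠ 0 := by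
        simpa using pv_digRev_ne_nil (a / 10)
      rw [← heq, h2] at h1; omega
    · rw [pv_digRev_big ha, pv_digRev_big hb] at heq
      have hlen : ([Nat.digitChar (a % 10)] : List Char).length = ([Nat.digitChar (b % 10)] : List Char).length := rfl
      obtain ⟨h1, h2⟩ := List.append_inj' heq hlen
      have hq : a / 10 = b / 10 := ih (a / 10) (by omega) (b / 10) h1
      have hr : a % 10 = b % 10 :=
        pv_digitChar_inj (by omega) (by omega) (by simpa using h2)
      omega

-- the heart of the equivalence: counting '8' in the common character prefix equals
-- B's arithmetic count of 8-digits in the stripped common value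
theorem pv_main (a : Nat) : ∀ b : Nat, (pvDigRev a).length = (pvDigRev b).length →
    (pvCP (pvDigRev a) (pvDigRev b)).count '8' = pvCnt8Go (pvStripGo a b) 0 := by
  induction a using Nat.strong_induction_on with
  | _ a ih =>
    intro b hlen
    by_cases hab : a = b
    · subst hab
      rw [pv_stripGo_eq, pv_cp_self, pv_count8_digRev]
    · rw [pv_stripGo_ne hab]
      by_cases ha : a < 10 <;> by_cases hb : b < 10
      · -- both single digits, digits differ
        have hne : Nat.digitChar a ≠ Nat.digitChar b :=
          fun he => hab (pv_digitChar_inj ha hb he)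
        rw [pv_digRev_small ha, pv_digRev_small hb, pvCP, if_neg hne]
        rw [Nat.div_eq_of_lt ha, Nat.div_eq_of_lt hb, pv_stripGo_eq, pv_cnt8Go_zero]
        rfl
      · -- length mismatch, impossible
        have h2 := pv_digRev_len_big hb
        have h3 : (pvDigRev (b / 10)).length ≠ 0 := by simpa using pv_digRev_ne_nil (b / 10)
        rw [pv_digRev_len_one ha, h2] at hlen; omega
      · have h2 := pv_digRev_len_big ha
        have h3 : (pvDigRev (a / 10)).length ≠ 0 := by simpa using pv_digRev_ne_nil (a / 10)
        rw [pv_digRev_len_one hb, h2] at hlen; omega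
      · -- both at least two digits
        have hlen' : (pvDigRev (a / 10)).length = (pvDigRev (b / 10)).length := by
          rw [pv_digRev_len_big ha, pv_digRev_len_big hb] at hlen; omega
        rw [pv_digRev_big ha, pv_digRev_big hb, pv_cp_append _ _ _ _ hlen']
        by_cases hq : a / 10 = b / 10
        · -- same quotient, last digits differ
          have hr : a % 10 ≠ b % 10 := by omega
          have hne : Nat.digitChar (a % 10) ≠ Nat.digitChar (b % 10) :=
            fun he => hr (pv_digitChar_inj (by omega) (by omega) he)
          rw [if_pos (by rw [hq]), if_neg hne, List.append_nil, pv_count8_digRev, hq, pv_stripGo_eq]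
        · have hne : pvDigRev (a / 10) ≠ pvDigRev (b / 10) :=
            fun he => hq (pv_digRev_inj (a / 10) (b / 10) he)
          rw [if_neg hne]
          exact ih (a / 10) (by omega) (b / 10) hlen'

-- ===== VERDICT (by name: the statement is the Claim_ definition above) =====
theorem count_min_eights_spec : Claim_equal_count_min_eights := by
  intro L R _
  unfold Spec_count_min_eights count_min_eights count_min_eights_alt
  simp only [PySem.Int.toChars, pv_toDigits_eq]
  by_cases hL : L < 0 <;> by_cases hR : R < 0
  · -- both negative: common '-' head
    rw [if_pos hL, if_pos hR]
    simp only [hL, hR, decide_true, ne_eq, not_true_eq_false, if_false, List.length_cons]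
    rw [← pv_digRev_length, ← pv_digRev_length]
    by_cases hlen : (pvDigRev L.natAbs).length = (pvDigRev R.natAbs).length
    · rw [if_neg (by omega), if_neg (by simpa using hlen)]
      rw [pvALoop, if_pos rfl, if_neg (by decide), pv_aloop_cp, pv_main L.natAbs R.natAbs hlen]
      simp
    · rw [if_pos (by omega), if_pos (by simpa using hlen)]
  · -- L negative, R nonnegative: B's sign guard fires; A sees '-' vs a digit (or shorter list)
    rw [if_pos hL, if_neg hR]
    simp only [hL, hR, decide_true, decide_false, ne_eq, reduceCtorEq, not_false_eq_true, if_true]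
    by_cases hlen : ('-' :: pvDigRev L.natAbs).length = (pvDigRev R.toNat).length
    · rw [if_neg (by simpa using hlen)]
      rcases he : pvDigRev R.toNat with _ | ⟨c, cs⟩
      · exact absurd he (pv_digRev_ne_nil _)
      · obtain ⟨m, hm, hc⟩ := pv_digRev_head_digit R.toNat c cs he
        have hne : ('-' : Char) ≠ c := by
          subst hc; exact fun he => pv_digitChar_ne_dash_fin ⟨m, hm⟩ he.symm
        rw [pvALoop, if_neg hne]
    · rw [if_pos (by simpa using hlen)]
  · -- L nonnegative, R negative
    rw [if_neg hL, if_pos hR]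
    simp only [hL, hR, decide_true, decide_false, ne_eq, reduceCtorEq, not_false_eq_true, if_true]
    by_cases hlen : (pvDigRev L.toNat).length = ('-' :: pvDigRev R.natAbs).length
    · rw [if_neg (by simpa using hlen)]
      rcases he : pvDigRev L.toNat with _ | ⟨c, cs⟩
      · exact absurd he (pv_digRev_ne_nil _)
      · obtain ⟨m, hm, hc⟩ := pv_digRev_head_digit L.toNat c cs he
        have hne : c ≠ ('-' : Char) := by
          subst hc; exact pv_digitChar_ne_dash_fin ⟨m, hm⟩
        rw [pvALoop, if_neg hne]
    · rw [if_pos (by simpa using hlen)]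
  · -- both nonnegative
    rw [if_neg hL, if_neg hR]
    simp only [hL, hR, decide_false, ne_eq, not_true_eq_false, if_false]
    have haL : L.toNat = L.natAbs := by omega
    have haR : R.toNat = R.natAbs := by omega
    rw [haL, haR, ← pv_digRev_length, ← pv_digRev_length]
    by_cases hlen : (pvDigRev L.natAbs).length = (pvDigRev R.natAbs).length
    · rw [if_neg (by omega), if_neg (by simpa using hlen)]
      rw [pv_aloop_cp, pv_main L.natAbs R.natAbs hlen]
      simp
    · rw [if_pos (by omega), if_pos (by simpa using hlen)]
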